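-- pv_equiv track=rewrite | github.com/wandelbotsgmbh/wandelscript | wandelscript/grammar/WandelscriptLexerBase.py | get_indentation_count
-- ===== SOURCE A (Python) =====
-- def get_indentation_count(whitespace: str):
--     count = 0
--     for c in whitespace:
--         if c == "\t":
--             count += 8 - count % 8
--         else:
--             count += 1
--     return count
-- ===== SOURCE B (Python) =====
-- # B: split the string on tabs once; count the first segment, then for each later
-- # segment advance to the next multiple of 8 before adding its length (simpler, bulk
-- # per-segment work instead of a per-character branch).
-- def get_indentation_count(whitespace: str):
--     segments = whitespace.split("\t")
--     count = len(segments[0])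
--     for seg in segments[1:]:
--         count += 8 - count % 8 + len(seg)
--     return count
-- ===== Notes on version B (the rewrite author's own statement) =====
-- stated objective: faster
-- what changed: B splits the string on tabs once and works per segment (count first segment's length, then for each later segment round up to the next multiple of 8 and add its length), replacing A's per-character Python-level branch loop with bulk C-level split/len work.
import Mathlib
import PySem

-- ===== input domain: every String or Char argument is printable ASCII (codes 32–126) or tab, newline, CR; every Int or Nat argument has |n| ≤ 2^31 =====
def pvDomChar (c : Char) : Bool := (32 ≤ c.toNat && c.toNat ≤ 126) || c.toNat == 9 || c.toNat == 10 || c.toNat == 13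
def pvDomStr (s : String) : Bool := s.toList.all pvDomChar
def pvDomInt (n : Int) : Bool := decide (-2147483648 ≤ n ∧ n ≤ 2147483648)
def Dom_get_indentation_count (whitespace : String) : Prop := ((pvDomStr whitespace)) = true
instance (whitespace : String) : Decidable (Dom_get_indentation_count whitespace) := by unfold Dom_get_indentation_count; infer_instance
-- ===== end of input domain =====

-- B splits the string on tabs and works per segment instead of branching per character; alternative decomposition, same O(n) cost.


-- ===== PORT A =====
-- per-character loop: tab advances to the next multiple of 8, anything else adds 1
def get_indentation_count (whitespace : String) : Int :=
  whitespace.toList.foldl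
    (fun count c => if c == '\t' then count + (8 - PySem.Int.mod count 8) else count + 1) 0

-- ===== PORT B =====
-- split on '\t' (Python single-char str.split ports to List.splitOn), then fold over the later segments
def get_indentation_count_alt (whitespace : String) : Int :=
  let segments := whitespace.toList.splitOn '\t'
  let count : Int := (segments.headD []).length
  segments.tail.foldl
    (fun count seg => count + (8 - PySem.Int.mod count 8) + (seg.length : Int)) count

-- ===== PRECONDITION & SPEC =====
def Spec_get_indentation_count (whitespace : String) (out : Int) : Prop := out = get_indentation_count_alt whitespace
instance (whitespace : String) (out : Int) : Decidable (Spec_get_indentation_count whitespace out) := by unfold Spec_get_indentation_count; infer_instance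

-- ===== CLAIM (what is proved, stated in full; the proofs are below) =====
def Claim_equal_get_indentation_count : Prop := ∀ (whitespace : String), Dom_get_indentation_count whitespace → Spec_get_indentation_count whitespace (get_indentation_count whitespace)

-- ===== LEMMAS AND PROOFS =====

-- A's character loop from any start equals B's segment fold on the split of the same list
lemma key_fold (xs : List Char) (c : Int) :
    xs.foldl (fun count ch => if ch == '\t' then count + (8 - PySem.Int.mod count 8) else count + 1) c
      = ((xs.splitOnP (· == '\t')).tail).foldl
          (fun count seg => count + (8 - PySem.Int.mod count 8) + (seg.length : Int))
          (c + (((xs.splitOnP (· == '\t')).headD []).length : Int)) := by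
  induction xs generalizing c with
  | nil => simp [List.splitOnP_nil]
  | cons a xs ih =>
    rw [List.splitOnP_cons]
    by_cases ha : a = '\t'
    · subst ha
      rw [List.foldl_cons]
      simp only [beq_self_eq_true, if_true]
      rw [ih]
      obtain ⟨h, t, hsplit⟩ : ∃ h t, xs.splitOnP (· == '\t') = h :: t := by
        rcases hx : xs.splitOnP (· == '\t') with _ | ⟨h, t⟩
        · exact absurd hx (List.splitOnP_ne_nil _ xs)
        · exact ⟨h, t, rfl⟩
      simp only [hsplit, List.tail_cons, List.headD_cons, List.foldl_cons, List.length_nil,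
        Nat.cast_zero, add_zero]
    · have hba : (a == '\t') = false := beq_eq_false_iff_ne.mpr ha
      rw [List.foldl_cons]
      simp only [hba, Bool.false_eq_true, if_false]
      rw [ih]
      obtain ⟨h, t, hsplit⟩ : ∃ h t, xs.splitOnP (· == '\t') = h :: t := by
        rcases hx : xs.splitOnP (· == '\t') with _ | ⟨h, t⟩
        · exact absurd hx (List.splitOnP_ne_nil _ xs)
        · exact ⟨h, t, rfl⟩
      simp only [hsplit, List.modifyHead_cons, List.tail_cons, List.headD_cons, List.length_cons]
      congr 1
      push_cast
      ring

-- ===== VERDICT (by name: the statement is the Claim_ definition above) =====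
theorem get_indentation_count_spec : Claim_equal_get_indentation_count := by
  intro w _
  unfold Spec_get_indentation_count get_indentation_count get_indentation_count_alt
  rw [key_fold]
  simp [List.splitOn]
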